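-- pv_equiv track=rewrite | github.com/pedrolara-boop/StashStudioSync | plugins/StudioSync/StudioSync.py | calculate_prefix_suffix_score
-- ===== SOURCE A (Python) =====
-- def calculate_prefix_suffix_score(name1, name2):
--     """Calculate score based on common prefixes and suffixes with improved weighting"""
--     name1 = name1.lower()
--     name2 = name2.lower()
--
--     score = 0
--     # Check for common prefixes with higher weight for longer matches
--     for i in range(min(len(name1), len(name2))):
--         if name1[:i] == name2[:i]:
--             score += i * 2  # Weight increases with length of match
--
--     # Check for common suffixes with higher weight for longer matches
--     for i in range(min(len(name1), len(name2))):
--         if name1[-i:] == name2[-i:]: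
--             score += i * 2  # Weight increases with length of match
--
--     return score
-- ===== SOURCE B (Python) =====
-- def _common(a, b):
--     """Length of the longest common prefix of a and b."""
--     n = 0
--     for x, y in zip(a, b):
--         if x != y:
--             break
--         n += 1
--     return n
--
--
-- def calculate_prefix_suffix_score(name1, name2):
--     """Closed-form score: only i <= lcp (resp. lcs) pass the slice test, so the
--     quadratic slice loops collapse to k*(k+1) with k capped at min_len - 1."""
--     a = name1.lower()
--     b = name2.lower()
--     m = min(len(a), len(b))
--     if m == 0:
--         return 0
--     k1 = min(_common(a, b), m - 1)
--     k2 = min(_common(a[::-1], b[::-1]), m - 1)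
--     return k1 * (k1 + 1) + k2 * (k2 + 1)
-- ===== Notes on version B (the rewrite author's own statement) =====
-- stated objective: faster
-- what changed: Replaced the two quadratic loops over all slice lengths by a single longest-common-prefix/suffix scan and the closed form k*(k+1) for the arithmetic-series sum.
import Mathlib
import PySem

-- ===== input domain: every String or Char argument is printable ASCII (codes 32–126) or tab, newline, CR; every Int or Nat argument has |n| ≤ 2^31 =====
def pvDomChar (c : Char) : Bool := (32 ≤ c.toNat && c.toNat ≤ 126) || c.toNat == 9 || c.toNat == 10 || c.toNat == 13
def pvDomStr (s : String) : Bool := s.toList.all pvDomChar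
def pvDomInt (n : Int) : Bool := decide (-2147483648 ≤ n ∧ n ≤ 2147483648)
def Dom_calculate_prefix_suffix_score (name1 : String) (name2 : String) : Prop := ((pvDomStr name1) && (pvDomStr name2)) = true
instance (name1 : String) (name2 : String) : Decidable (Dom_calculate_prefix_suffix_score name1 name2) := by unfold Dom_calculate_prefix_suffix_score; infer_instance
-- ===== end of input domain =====

-- B replaces A's two quadratic slice loops by one lcp/lcs scan plus the closed form k*(k+1) (faster).


-- ===== PORT A =====
def calculate_prefix_suffix_score (name1 : String) (name2 : String) : Int :=
  let a := PySem.Chars.lower name1.toList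
  let b := PySem.Chars.lower name2.toList
  let m : Int := min (a.length : Int) (b.length : Int)
  let score1 : Int := (PySem.List.pyRange 0 m 1).foldl
    (fun s i => if PySem.List.slice a none (some i) = PySem.List.slice b none (some i)
                then s + i * 2 else s) 0
  (PySem.List.pyRange 0 m 1).foldl
    (fun s i => if PySem.List.slice a (some (-i)) none = PySem.List.slice b (some (-i)) none
                then s + i * 2 else s) score1

-- ===== PORT B =====
-- B's helper `_common`: longest common prefix length (zip scan with break)
def pvCommon : List Char → List Char → Nat
  | x :: xs, y :: ys => if x = y then pvCommon xs ys + 1 else 0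
  | _, _ => 0

def calculate_prefix_suffix_score_alt (name1 : String) (name2 : String) : Int :=
  let a := PySem.Chars.lower name1.toList
  let b := PySem.Chars.lower name2.toList
  let m := min a.length b.length
  if m = 0 then 0
  else
    let k1 := min (pvCommon a b) (m - 1)
    let k2 := min (pvCommon a.reverse b.reverse) (m - 1)
    ((k1 * (k1 + 1) + k2 * (k2 + 1) : Nat) : Int)

-- ===== PRECONDITION & SPEC =====
def Spec_calculate_prefix_suffix_score (name1 : String) (name2 : String) (out : Int) : Prop := out = calculate_prefix_suffix_score_alt name1 name2
instance (name1 : String) (name2 : String) (out : Int) : Decidable (Spec_calculate_prefix_suffix_score name1 name2 out) := by unfold Spec_calculate_prefix_suffix_score; infer_instance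

-- ===== CLAIM (what is proved, stated in full; the proofs are below) =====
def Claim_equal_calculate_prefix_suffix_score : Prop := ∀ (name1 : String) (name2 : String), Dom_calculate_prefix_suffix_score name1 name2 → Spec_calculate_prefix_suffix_score name1 name2 (calculate_prefix_suffix_score name1 name2)

-- ===== LEMMAS AND PROOFS =====

-- take n a = take n b exactly when n is at most the longest-common-prefix length
lemma take_eq_take_iff_le_common (a b : List Char) (n : Nat)
    (ha : n ≤ a.length) (hb : n ≤ b.length) :
    a.take n = b.take n ↔ n ≤ pvCommon a b := by
  induction a generalizing b n with
  | nil =>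
    have : n = 0 := by simpa using ha
    subst this; simp [pvCommon]
  | cons x xs ih =>
    cases b with
    | nil =>
      have : n = 0 := by simpa using hb
      subst this; simp [pvCommon]
    | cons y ys =>
      cases n with
      | zero => simp
      | succ n =>
        simp only [List.take_succ_cons, List.cons.injEq, pvCommon]
        by_cases hxy : x = y
        · subst hxy
          rw [if_pos rfl, ih ys n (by simpa using ha) (by simpa using hb)]
          simp only [true_and]
          omega
        · simp [hxy]

-- the generic collapsed loop: a 0/2i-fold whose test is "i ≤ L" on 1 ≤ i ≤ n
lemma score_fold (c : Nat → Prop) [DecidablePred c] (L : Nat) :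
    ∀ (n : Nat), (∀ i, 1 ≤ i → i ≤ n → (c i ↔ i ≤ L)) → ∀ (s0 : Int),
    (List.range (n + 1)).foldl (fun s i => if c i then s + (i : Int) * 2 else s) s0
      = s0 + (min L n) * (min L n + 1) := by
  intro n
  induction n with
  | zero => intro _ s0; by_cases h : c 0 <;> simp [List.range_succ, h]
  | succ n ih =>
    intro hc s0
    have hcn : c (n + 1) ↔ n + 1 ≤ L := hc (n + 1) (by omega) (le_refl _)
    rw [List.range_succ, List.foldl_append,
        ih (fun i h1 h2 => hc i h1 (h2.trans (Nat.le_succ n))) s0]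
    simp only [List.foldl_cons, List.foldl_nil]
    by_cases hL : n + 1 ≤ L
    · rw [if_pos (hcn.mpr hL)]
      have h1 : min L n = n := by omega
      have h2 : min L (n + 1) = n + 1 := by omega
      rw [h1, h2]
      push_cast
      ring
    · rw [if_neg (fun h => hL (hcn.mp h))]
      have : min L (n + 1) = min L n := by omega
      rw [this]

-- the suffix slice a[-i:] (1 ≤ i ≤ len) equals the reversed take of the reverse
lemma drop_eq_reverse_take (a : List Char) (i : Nat) :
    a.drop (a.length - i) = (a.reverse.take i).reverse := by
  rw [List.take_reverse, List.reverse_reverse]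

-- the whole equivalence, stated over the lowered character lists
lemma core (a b : List Char) :
    (PySem.List.pyRange 0 (min (a.length : Int) (b.length : Int)) 1).foldl
      (fun s i => if PySem.List.slice a (some (-i)) none = PySem.List.slice b (some (-i)) none
                  then s + i * 2 else s)
      ((PySem.List.pyRange 0 (min (a.length : Int) (b.length : Int)) 1).foldl
        (fun s i => if PySem.List.slice a none (some i) = PySem.List.slice b none (some i)
                    then s + i * 2 else s) 0)
    = (if min a.length b.length = 0 then 0
       else
         ((min (pvCommon a b) (min a.length b.length - 1)
             * (min (pvCommon a b) (min a.length b.length - 1) + 1)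
           + min (pvCommon a.reverse b.reverse) (min a.length b.length - 1)
             * (min (pvCommon a.reverse b.reverse) (min a.length b.length - 1) + 1) : Nat) : Int)) := by
  have hmin : (min (a.length : Int) (b.length : Int)) = ((min a.length b.length : Nat) : Int) := by
    push_cast; rfl
  rcases Nat.eq_zero_or_pos (min a.length b.length) with h0 | hpos
  · rw [hmin, h0]
    simp
  · obtain ⟨n, hn⟩ : ∃ n, min a.length b.length = n + 1 := ⟨min a.length b.length - 1, by omega⟩
    have hla : n + 1 ≤ a.length := hn ▸ Nat.min_le_left _ _
    have hlb : n + 1 ≤ b.length := hn ▸ Nat.min_le_right _ _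
    have hc1 : ∀ i, 1 ≤ i → i ≤ n →
        (PySem.List.slice a none (some (i : Int)) = PySem.List.slice b none (some (i : Int))
          ↔ i ≤ pvCommon a b) := by
      intro i _ h2
      rw [PySem.List.slice_to_natCast, PySem.List.slice_to_natCast]
      exact take_eq_take_iff_le_common a b i (by omega) (by omega)
    have hc2 : ∀ i, 1 ≤ i → i ≤ n →
        (PySem.List.slice a (some (-(i : Int))) none = PySem.List.slice b (some (-(i : Int))) none
          ↔ i ≤ pvCommon a.reverse b.reverse) := by
      intro i h1 h2
      rw [PySem.List.slice_from_neg_natCast a i h1, PySem.List.slice_from_neg_natCast b i h1,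
          drop_eq_reverse_take, drop_eq_reverse_take, List.reverse_inj]
      exact take_eq_take_iff_le_common a.reverse b.reverse i (by simpa using by omega)
        (by simpa using by omega)
    rw [hmin, hn, PySem.List.pyRange_zero_nat, List.foldl_map, List.foldl_map,
        score_fold _ (pvCommon a b) n hc1 0,
        score_fold _ (pvCommon a.reverse b.reverse) n hc2 _]
    simp only [Nat.add_sub_cancel, if_neg (Nat.succ_ne_zero n)]
    push_cast
    ring

-- ===== VERDICT (by name: the statement is the Claim_ definition above) =====
theorem calculate_prefix_suffix_score_spec : Claim_equal_calculate_prefix_suffix_score := by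
  intro name1 name2 _
  unfold Spec_calculate_prefix_suffix_score
  exact core (PySem.Chars.lower name1.toList) (PySem.Chars.lower name2.toList)
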